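-- pv_equiv track=rewrite | github.com/Mondego/SourcererCC | filterResults.py | compareLisenseLists
-- ===== SOURCE A (Python) =====
-- def compareLisenseLists(licenses1, licenses2):
--     if licenses1[0] == '' or licenses2[0] == '':
--         return False
--     for l1 in licenses1:
--         for l2 in licenses2:
--             if not ('deprecated' in l1) and not ('deprecated' in l2) and not compareLisenses(l1, l2):
--                 return False
--     return True
--
-- def compareLisenses(license1, license2):
--     license1 = renameLicense(license1)
--     license2 = renameLicense(license2)
--     if license1 == license2:
--         return True
--     return False
--
-- def renameLicense(my_license):
--     basicLicenses = ['MIT', 'Apache-2.0', 'GPL-2.0', 'GPL-3.0', 'LGPL-3.0', 'AGPL-3.0', 'BSD-3-Clause', 'BSD-2-Clause']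
--     for licenseType in basicLicenses:
--         if licenseType in my_license:
--             return licenseType
--     return my_license
-- ===== SOURCE B (Python) =====
-- def compareLisenseLists(licenses1, licenses2):
--     if licenses1[0] == '' or licenses2[0] == '':
--         return False
--     basic = ['MIT', 'Apache-2.0', 'GPL-2.0', 'GPL-3.0', 'LGPL-3.0', 'AGPL-3.0', 'BSD-3-Clause', 'BSD-2-Clause']
--
--     def canon(lic):
--         return next((b for b in basic if b in lic), lic)
--
--     s1 = {canon(l) for l in licenses1 if 'deprecated' not in l}
--     s2 = {canon(l) for l in licenses2 if 'deprecated' not in l}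
--     return not s1 or not s2 or len(s1 | s2) == 1
-- ===== Notes on version B (the rewrite author's own statement) =====
-- stated objective: faster
-- what changed: Replaces A's nested loop comparing every pair (with renameLicense re-run per pair) by a single pass that canonicalises each list once into a set of non-deprecated canonical names and checks that one set is empty or their union is a singleton.
import Mathlib
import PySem

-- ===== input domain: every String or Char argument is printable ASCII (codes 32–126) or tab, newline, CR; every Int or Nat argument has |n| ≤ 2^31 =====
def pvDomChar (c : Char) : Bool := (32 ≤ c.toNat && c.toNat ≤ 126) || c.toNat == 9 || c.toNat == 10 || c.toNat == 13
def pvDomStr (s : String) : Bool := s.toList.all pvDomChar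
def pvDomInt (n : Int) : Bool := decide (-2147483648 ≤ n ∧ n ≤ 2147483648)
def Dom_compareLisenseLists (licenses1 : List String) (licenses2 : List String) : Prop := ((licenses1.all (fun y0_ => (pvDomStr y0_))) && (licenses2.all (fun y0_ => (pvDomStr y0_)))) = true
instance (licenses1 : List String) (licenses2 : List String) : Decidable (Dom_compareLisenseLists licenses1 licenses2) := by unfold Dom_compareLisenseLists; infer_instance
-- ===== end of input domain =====

-- ===== PORT A =====
-- B replaces A's nested pair loop by a one-pass canonicalisation into two sets (alternative/faster).
-- A raises IndexError on licenses1 = [] and on licenses2 = [] when licenses1[0] != '' — excluded by Pre_.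

-- renameLicense: loop over basicLicenses with early return
def renameGo : List String → String → String
  | [], myLicense => myLicense
  | t :: ts, myLicense => if PySem.Str.isIn t myLicense then t else renameGo ts myLicense

def renameLicense (myLicense : String) : String :=
  renameGo ["MIT", "Apache-2.0", "GPL-2.0", "GPL-3.0", "LGPL-3.0", "AGPL-3.0", "BSD-3-Clause", "BSD-2-Clause"] myLicense

def compareLisenses (license1 : String) (license2 : String) : Bool :=
  if renameLicense license1 == renameLicense license2 then true else false

def compareLisenseLists (licenses1 : List String) (licenses2 : List String) : Bool :=
  match PySem.List.pyGet? licenses1 0 with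
  | none => false  -- IndexError in Python; unreachable under Pre_
  | some h1 =>
    if h1 == "" then false
    else
      match PySem.List.pyGet? licenses2 0 with
      | none => false  -- IndexError in Python; unreachable under Pre_
      | some h2 =>
        if h2 == "" then false
        else
          -- nested for-loops with early 'return False' = all/all
          licenses1.all (fun l1 => licenses2.all (fun l2 =>
            PySem.Str.isIn "deprecated" l1 || PySem.Str.isIn "deprecated" l2 || compareLisenses l1 l2))

-- ===== PORT B =====
def canonB (lic : String) : String :=
  ((["MIT", "Apache-2.0", "GPL-2.0", "GPL-3.0", "LGPL-3.0", "AGPL-3.0", "BSD-3-Clause", "BSD-2-Clause"].find?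
      (fun b => PySem.Str.isIn b lic)).getD lic)

def compareLisenseLists_alt (licenses1 : List String) (licenses2 : List String) : Bool :=
  match PySem.List.pyGet? licenses1 0 with
  | none => false  -- IndexError in Python; unreachable under Pre_
  | some h1 =>
    if h1 == "" then false
    else
      match PySem.List.pyGet? licenses2 0 with
      | none => false  -- IndexError in Python; unreachable under Pre_
      | some h2 =>
        if h2 == "" then false
        else
          let s1 : PySem.Set String :=
            PySem.Set.ofList ((licenses1.filter (fun l => !PySem.Str.isIn "deprecated" l)).map canonB)
          let s2 : PySem.Set String :=
            PySem.Set.ofList ((licenses2.filter (fun l => !PySem.Str.isIn "deprecated" l)).map canonB)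
          s1.isEmpty || s2.isEmpty || (PySem.Set.len (PySem.Set.union s1 s2) == 1)

-- ===== PRECONDITION & SPEC =====
-- Pre_ excludes exactly the inputs where the Python raises IndexError: licenses1 = [],
-- or licenses2 = [] while licenses1[0] != '' (the '' guard short-circuits).
def Pre_compareLisenseLists (licenses1 : List String) (licenses2 : List String) : Prop :=
  licenses1 ≠ [] ∧ (licenses2 ≠ [] ∨ licenses1.head? = some "")
instance (licenses1 : List String) (licenses2 : List String) : Decidable (Pre_compareLisenseLists licenses1 licenses2) := by unfold Pre_compareLisenseLists; infer_instance

def pvWitness_compareLisenseLists : List String × List String := (["MIT"], ["MIT License"])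

def Spec_compareLisenseLists (licenses1 : List String) (licenses2 : List String) (out : Bool) : Prop := out = compareLisenseLists_alt licenses1 licenses2
instance (licenses1 : List String) (licenses2 : List String) (out : Bool) : Decidable (Spec_compareLisenseLists licenses1 licenses2 out) := by unfold Spec_compareLisenseLists; infer_instance

-- ===== CLAIM (what is proved, stated in full; the proofs are below) =====
def Claim_equal_compareLisenseLists : Prop := ∀ (licenses1 : List String) (licenses2 : List String), Dom_compareLisenseLists licenses1 licenses2 → Pre_compareLisenseLists licenses1 licenses2 → Spec_compareLisenseLists licenses1 licenses2 (compareLisenseLists licenses1 licenses2)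

-- ===== LEMMAS AND PROOFS =====

-- A's renameLicense and B's canon compute the same canonical name.
theorem canonB_eq_rename (lic : String) : canonB lic = renameLicense lic := by
  simp only [canonB, renameLicense]
  generalize ["MIT", "Apache-2.0", "GPL-2.0", "GPL-3.0", "LGPL-3.0", "AGPL-3.0", "BSD-3-Clause", "BSD-2-Clause"] = L
  induction L with
  | nil => rfl
  | cons t ts ih =>
    simp only [PySem.Str.isIn] at ih
    by_cases h : PySem.Chars.isIn t.toList lic.toList <;>
      simp [renameGo, List.find?, PySem.Str.isIn, h, ih]

theorem compareLisenses_eq (a b : String) :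
    compareLisenses a b = (renameLicense a == renameLicense b) := by
  unfold compareLisenses; split <;> simp_all

-- a Nodup list whose members all equal c, with c a member, is a singleton
theorem nodup_all_eq_length_one {α : Type} {u : List α} {c : α}
    (hn : u.Nodup) (hc : c ∈ u) (hall : ∀ x ∈ u, x = c) : u.length = 1 := by
  match u, hn, hc with
  | [x], _, _ => rfl
  | x :: y :: t, hn, _ =>
    exfalso
    have hx := hall x (by simp)
    have hy := hall y (by simp)
    simp [List.nodup_cons] at hn
    exact hn.1.1 (by rw [hx, hy])

-- core equivalence: A's pairwise all/all equals B's set formulation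
theorem key_lemma (p : String → Bool) (r : String → String) (l1 l2 : List String) :
    (l1.all (fun a => l2.all (fun b => p a || p b || (r a == r b)))) =
    ((PySem.Set.ofList ((l1.filter (fun l => !p l)).map r)).isEmpty ||
     (PySem.Set.ofList ((l2.filter (fun l => !p l)).map r)).isEmpty ||
     (PySem.Set.len (PySem.Set.union (PySem.Set.ofList ((l1.filter (fun l => !p l)).map r))
        (PySem.Set.ofList ((l2.filter (fun l => !p l)).map r))) == 1)) := by
  set m1 := (l1.filter (fun l => !p l)).map r with hm1
  set m2 := (l2.filter (fun l => !p l)).map r with hm2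
  set s1 : PySem.Set String := PySem.Set.ofList m1 with hs1
  set s2 : PySem.Set String := PySem.Set.ofList m2 with hs2
  set U := PySem.Set.union s1 s2 with hU
  have hmemU : ∀ x, x ∈ U ↔ (x ∈ m1 ∨ x ∈ m2) := by
    intro x
    rw [hU, PySem.Set.mem_union]
    simp [hs1, hs2, PySem.Set.mem_ofList]
  have hnodupU : U.Nodup := PySem.Set.nodup_union s1 s2 (PySem.Set.nodup_ofList _)
  have lhs_iff : (l1.all (fun a => l2.all (fun b => p a || p b || (r a == r b)))) = true ↔
      (∀ x ∈ m1, ∀ y ∈ m2, x = y) := by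
    simp only [List.all_eq_true, hm1, hm2, List.mem_map, List.mem_filter]
    constructor
    · rintro h x ⟨a, ⟨ha, hpa⟩, rfl⟩ y ⟨b, ⟨hb, hpb⟩, rfl⟩
      have := h a ha b hb
      simp_all
    · intro h a ha b hb
      by_cases hpa : p a
      · simp [hpa]
      · by_cases hpb : p b
        · simp [hpb]
        · have := h (r a) ⟨a, ⟨ha, by simp [hpa]⟩, rfl⟩ (r b) ⟨b, ⟨hb, by simp [hpb]⟩, rfl⟩
          simp [this]
  have hempty : ∀ (m : List String), (PySem.Set.ofList m).isEmpty = true ↔ m = [] := by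
    intro m
    rw [List.isEmpty_iff]
    constructor
    · intro h
      rcases hx : m with _ | ⟨x, xs⟩
      · rfl
      · exfalso
        have hxm : x ∈ PySem.Set.ofList m := by
          rw [PySem.Set.mem_ofList, hx]; simp
        rw [h] at hxm
        simp at hxm
    · intro h; rw [h]; rfl
  have rhs_iff : (s1.isEmpty || s2.isEmpty || (PySem.Set.len U == 1)) = true ↔
      (m1 = [] ∨ m2 = [] ∨ U.length = 1) := by
    have hlen : (PySem.Set.len U == 1) = true ↔ U.length = 1 := by
      simp [PySem.Set.len]
    simp only [Bool.or_eq_true, hs1, hs2, hempty, hlen]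
    tauto
  rw [Bool.eq_iff_iff, lhs_iff, rhs_iff]
  constructor
  · intro h
    rcases hx : m1 with _ | ⟨a, as⟩
    · exact Or.inl rfl
    rcases hy : m2 with _ | ⟨b, bs⟩
    · exact Or.inr (Or.inl rfl)
    refine Or.inr (Or.inr (nodup_all_eq_length_one hnodupU ((hmemU a).mpr (Or.inl (by rw [hx]; simp))) ?_))
    intro x hxU
    have hb : b ∈ m2 := by rw [hy]; simp
    have ha : a ∈ m1 := by rw [hx]; simp
    rcases (hmemU x).mp hxU with hxm | hxm
    · rw [h x hxm b hb, ← h a ha b hb]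
    · exact (h a ha x hxm).symm
  · rintro (h | h | h) x hx y hy
    · rw [h] at hx; simp at hx
    · rw [h] at hy; simp at hy
    · obtain ⟨c, hc⟩ := List.length_eq_one_iff.mp h
      have hxc : x ∈ U := (hmemU x).mpr (Or.inl hx)
      have hyc : y ∈ U := (hmemU y).mpr (Or.inr hy)
      rw [hc] at hxc hyc
      simp at hxc hyc
      rw [hxc, hyc]

-- ===== VERDICT (by name: the statement is the Claim_ definition above) =====
theorem compareLisenseLists_spec : Claim_equal_compareLisenseLists := by
  intro l1 l2 _ _
  unfold Spec_compareLisenseLists compareLisenseLists compareLisenseLists_alt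
  have hcanon : canonB = renameLicense := funext canonB_eq_rename
  cases PySem.List.pyGet? l1 0 with
  | none => rfl
  | some h1 =>
    by_cases hh1 : h1 == ""
    · simp [hh1]
    · simp only [hh1, if_false, Bool.false_eq_true]
      cases PySem.List.pyGet? l2 0 with
      | none => rfl
      | some h2 =>
        by_cases hh2 : h2 == ""
        · simp [hh2]
        · simp only [hh2, if_false, Bool.false_eq_true, hcanon, compareLisenses_eq]
          exact key_lemma _ renameLicense l1 l2
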